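-- pv_equiv track=rewrite | github.com/novotnyllc/dotnet-marketplace | scripts/validate_cross_agent.py | _strip_generated_codex_prefix
-- ===== SOURCE A (Python) =====
-- def _strip_generated_codex_prefix(text: str, name: str, description: str) -> str:
--     """Remove the generated ## heading + description prefix from a Codex section.
--
--     generate_dist.py produces sections like:
--       ## {name}
--       <blank>
--       {description}
--       <blank>
--       {body}
--       ---
--     """
--     prefix = f"## {name}\n"
--     if not text.startswith(prefix):
--         return text
--
--     rest = text[len(prefix):]
--
--     # Strip blank lines after heading
--     while rest.startswith("\n"):
--         rest = rest[1:]
--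
--     # Strip description paragraph if present
--     if description:
--         desc_normalized = description.strip()
--         rest_line_end = rest.find("\n")
--         if rest_line_end == -1:
--             rest_line_end = len(rest)
--         first_line = rest[:rest_line_end].strip()
--
--         if first_line == desc_normalized:
--             rest = rest[rest_line_end:]
--             # Strip blank lines after description
--             while rest.startswith("\n"):
--                 rest = rest[1:]
--
--     return rest
-- ===== SOURCE B (Python) =====
-- def _strip_generated_codex_prefix(text: str, name: str, description: str) -> str:
--     """Line-list rewrite: split the tail into lines once, pop the generated
--     parts off the front, and join what is left."""
--     prefix = f"## {name}\n"
--     if not text.startswith(prefix):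
--         return text
--
--     lines = text[len(prefix):].split("\n")
--
--     # Drop blank lines after the heading (only truly empty line elements).
--     while lines and lines[0] == "":
--         lines.pop(0)
--
--     # Drop the description line if it is present, then blank lines after it.
--     if description and lines and lines[0].strip() == description.strip():
--         lines.pop(0)
--         while lines and lines[0] == "":
--             lines.pop(0)
--
--     return "\n".join(lines)
-- ===== Notes on version B (the rewrite author's own statement) =====
-- stated objective: alternative
-- what changed: Replaces A's repeated string re-slicing (startswith/while-lstrip loops, find, two slices) by one split('\n') into a line list, popping the generated heading blanks / description line off the front and joining what remains.
import Mathlib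
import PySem

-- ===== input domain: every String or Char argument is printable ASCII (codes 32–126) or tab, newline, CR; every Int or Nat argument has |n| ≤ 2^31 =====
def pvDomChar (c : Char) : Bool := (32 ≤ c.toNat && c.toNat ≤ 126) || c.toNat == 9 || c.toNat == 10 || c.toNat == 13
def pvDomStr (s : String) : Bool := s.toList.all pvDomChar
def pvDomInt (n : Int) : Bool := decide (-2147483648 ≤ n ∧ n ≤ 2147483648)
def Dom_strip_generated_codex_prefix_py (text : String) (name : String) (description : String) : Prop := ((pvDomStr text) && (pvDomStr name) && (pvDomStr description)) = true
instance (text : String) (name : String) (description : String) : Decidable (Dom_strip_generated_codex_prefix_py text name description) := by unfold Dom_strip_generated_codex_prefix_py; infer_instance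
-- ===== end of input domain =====

-- B rewrites the prefix-stripping as one split('\n') plus popping the generated
-- parts off the front of the line list (objective: alternative; same cost).

-- ===== PORT A =====
-- 'while rest.startswith("\n"): rest = rest[1:]'  (startswith("\n") on a list = head is '\n')
def pvDropNLs : List Char → List Char
  | [] => []
  | c :: t => if c = '\n' then pvDropNLs t else c :: t

def strip_generated_codex_prefix_py (text : String) (name : String) (description : String) : String :=
  let pfx : List Char := "## ".toList ++ name.toList ++ ['\n']
  let tl := text.toList
  if ¬ PySem.Chars.startswith tl pfx then text
  else
    let rest := PySem.List.slice tl (some (pfx.length : Int)) none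
    let rest := pvDropNLs rest
    if description ≠ "" then
      let descNorm := PySem.Chars.strip description.toList
      let e0 := PySem.Chars.find rest ['\n']
      let e : Int := if e0 = -1 then (rest.length : Int) else e0
      let firstLine := PySem.Chars.strip (PySem.List.slice rest none (some e))
      if firstLine = descNorm then
        String.ofList (pvDropNLs (PySem.List.slice rest (some e) none))
      else String.ofList rest
    else String.ofList rest

-- ===== PORT B =====
-- 'while lines and lines[0] == "": lines.pop(0)'
def pvDropEmptyLines : List (List Char) → List (List Char)
  | [] => []
  | l :: t => if l = [] then pvDropEmptyLines t else l :: t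

def strip_generated_codex_prefix_py_alt (text : String) (name : String) (description : String) : String :=
  let pfx : List Char := "## ".toList ++ name.toList ++ ['\n']
  let tl := text.toList
  if ¬ PySem.Chars.startswith tl pfx then text
  else
    let lines := PySem.Chars.splitOn (PySem.List.slice tl (some (pfx.length : Int)) none) ['\n']
    let lines := pvDropEmptyLines lines
    let lines :=
      if description ≠ "" ∧ lines ≠ [] ∧
          PySem.Chars.strip lines.head! = PySem.Chars.strip description.toList then
        pvDropEmptyLines lines.tail
      else lines
    String.ofList (PySem.Chars.join ['\n'] lines)

-- ===== PRECONDITION & SPEC =====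
def Spec_strip_generated_codex_prefix_py (text : String) (name : String) (description : String) (out : String) : Prop := out = strip_generated_codex_prefix_py_alt text name description
instance (text : String) (name : String) (description : String) (out : String) : Decidable (Spec_strip_generated_codex_prefix_py text name description out) := by unfold Spec_strip_generated_codex_prefix_py; infer_instance

-- ===== CLAIM (what is proved, stated in full; the proofs are below) =====
def Claim_equal_strip_generated_codex_prefix_py : Prop := ∀ (text : String) (name : String) (description : String), Dom_strip_generated_codex_prefix_py text name description → Spec_strip_generated_codex_prefix_py text name description (strip_generated_codex_prefix_py text name description)


-- ===== LEMMAS AND PROOFS =====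

-- PySem's split with the one-character separator '\n' is Mathlib's List.splitOn '\n'.
theorem pv_splitOn_go (l : List Char) : ∀ (fuel : Nat) (cur : List Char) (acc : List (List Char)),
    l.length ≤ fuel →
    PySem.Chars.splitOn.go ['\n'] fuel l cur acc
      = acc.reverse ++ (List.splitOn '\n' l).modifyHead (cur.reverse ++ ·) := by
  induction l with
  | nil =>
    intro fuel cur acc _
    cases fuel <;> simp [PySem.Chars.splitOn.go, List.splitOn, List.splitOnP, List.splitOnP.go]
  | cons c t ih =>
    intro fuel cur acc hf
    cases fuel with
    | zero => simp at hf
    | succ f =>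
      have hf' : t.length ≤ f := by simpa using hf
      obtain ⟨a, as, hsp⟩ : ∃ a as, List.splitOn '\n' t = a :: as := by
        rcases h : List.splitOn '\n' t with _ | ⟨a, as⟩
        · exact absurd h (List.splitOnP_ne_nil _ _)
        · exact ⟨a, as, rfl⟩
      have hsp' : List.splitOnP (fun x => x == '\n') t = a :: as := hsp
      by_cases hc : c = '\n'
      · subst hc
        rw [show PySem.Chars.splitOn.go ['\n'] (f+1) ('\n'::t) cur acc
              = PySem.Chars.splitOn.go ['\n'] f t [] (cur.reverse :: acc) by
            simp [PySem.Chars.splitOn.go, List.isPrefixOf]]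
        rw [ih f [] (cur.reverse :: acc) hf']
        simp [List.splitOn, List.splitOnP_cons, hsp']
      · rw [show PySem.Chars.splitOn.go ['\n'] (f+1) (c::t) cur acc
              = PySem.Chars.splitOn.go ['\n'] f t (c::cur) acc by
            simp [PySem.Chars.splitOn.go, List.isPrefixOf]
            intro h; exact absurd h.symm hc]
        rw [ih f (c::cur) acc hf']
        simp [List.splitOn, List.splitOnP_cons, hc, hsp']

theorem pv_splitOn_eq (s : List Char) :
    PySem.Chars.splitOn s ['\n'] = List.splitOn '\n' s := by
  rw [show PySem.Chars.splitOn s ['\n'] = PySem.Chars.splitOn.go ['\n'] (s.length + 1) s [] [] from rfl]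
  rw [pv_splitOn_go s (s.length + 1) [] [] (by omega)]
  rcases h : List.splitOn '\n' s with _ | ⟨a, as⟩
  · exact absurd h (List.splitOnP_ne_nil _ _)
  · simp

theorem pv_noNL (s : List Char) : ∀ l ∈ List.splitOn '\n' s, '\n' ∉ l := by
  induction s with
  | nil => intro l hl; simp [List.splitOn, List.splitOnP, List.splitOnP.go] at hl; subst hl; simp
  | cons c t ih =>
    intro l hl
    by_cases hc : c = '\n'
    · subst hc
      rw [show List.splitOn '\n' ('\n'::t) = List.splitOnP (· == '\n') ('\n'::t) from rfl,
          List.splitOnP_cons] at hl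
      simp at hl
      rcases hl with hl | hl
      · simp [hl]
      · exact ih l hl
    · rw [show List.splitOn '\n' (c::t) = List.splitOnP (· == '\n') (c::t) from rfl,
          List.splitOnP_cons] at hl
      obtain ⟨a, as, hsp⟩ : ∃ a as, List.splitOn '\n' t = a :: as := by
        rcases h : List.splitOn '\n' t with _ | ⟨a, as⟩
        · exact absurd h (List.splitOnP_ne_nil _ _)
        · exact ⟨a, as, rfl⟩
      rw [show List.splitOnP (· == '\n') t = List.splitOn '\n' t from rfl, hsp] at hl
      simp [hc] at hl
      rcases hl with hl | hl
      · subst hl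
        intro hmem
        rcases List.mem_cons.mp hmem with h | h
        · exact hc h.symm
        · exact ih a (by simp [hsp]) h
      · exact ih l (by simp [hsp, hl])

theorem pv_mem_dropEmptyLines {x : List Char} {parts : List (List Char)}
    (h : x ∈ pvDropEmptyLines parts) : x ∈ parts := by
  induction parts with
  | nil => simp [pvDropEmptyLines] at h
  | cons l t ih =>
    by_cases hl : l = []
    · simp [pvDropEmptyLines, hl] at h
      exact List.mem_cons_of_mem _ (ih (by simpa [pvDropEmptyLines] using h))
    · simp [pvDropEmptyLines, hl] at h
      simpa using h

theorem pv_dropEmpty_shape (parts : List (List Char)) :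
    pvDropEmptyLines parts = [] ∨
      ∃ l0 lt, pvDropEmptyLines parts = l0 :: lt ∧ l0 ≠ [] := by
  induction parts with
  | nil => left; rfl
  | cons l t ih =>
    by_cases hl : l = []
    · simpa [pvDropEmptyLines, hl] using ih
    · right; exact ⟨l, t, by simp [pvDropEmptyLines, hl], hl⟩

-- joining after popping leading empty lines = the lstrip('\n') loop on the joined text
theorem pv_join_dropEmpty (parts : List (List Char)) (h : ∀ l ∈ parts, '\n' ∉ l) :
    PySem.Chars.join ['\n'] (pvDropEmptyLines parts)
      = pvDropNLs (PySem.Chars.join ['\n'] parts) := by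
  induction parts with
  | nil => simp [pvDropEmptyLines, PySem.Chars.join, List.intercalate, pvDropNLs]
  | cons l t ih =>
    have ht : ∀ l' ∈ t, '\n' ∉ l' := fun l' hl' => h l' (List.mem_cons_of_mem _ hl')
    by_cases hl : l = []
    · subst hl
      rcases t with _ | ⟨b, ts⟩
      · simp [pvDropEmptyLines, PySem.Chars.join, List.intercalate, pvDropNLs]
      · rw [show pvDropEmptyLines ([] :: b :: ts) = pvDropEmptyLines (b :: ts) by
            simp [pvDropEmptyLines]]
        rw [ih ht]
        have : PySem.Chars.join ['\n'] ([] :: b :: ts) = '\n' :: PySem.Chars.join ['\n'] (b :: ts) := by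
          simp [PySem.Chars.join, List.intercalate, List.intersperse]
        rw [this, show pvDropNLs ('\n' :: PySem.Chars.join ['\n'] (b :: ts))
              = pvDropNLs (PySem.Chars.join ['\n'] (b :: ts)) by simp [pvDropNLs]]
    · rcases l with _ | ⟨c, cs⟩
      · exact absurd rfl hl
      have hc : c ≠ '\n' := fun hc => h _ (List.mem_cons_self) (hc ▸ List.mem_cons_self)
      rw [show pvDropEmptyLines ((c :: cs) :: t) = (c :: cs) :: t by simp [pvDropEmptyLines]]
      rcases t with _ | ⟨b, ts⟩
      · simp [PySem.Chars.join, List.intercalate, pvDropNLs, hc]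
      · have : PySem.Chars.join ['\n'] ((c :: cs) :: b :: ts)
            = c :: (cs ++ '\n' :: PySem.Chars.join ['\n'] (b :: ts)) := by
          simp [PySem.Chars.join, List.intercalate, List.intersperse]
        rw [this]
        simp [pvDropNLs, hc]

theorem pv_find_no_nl {s : List Char} (h : '\n' ∉ s) :
    PySem.Chars.find s ['\n'] = -1 := by
  rw [PySem.Chars.find_eq_neg_one_iff]
  rw [List.singleton_infix_iff]
  exact h

theorem pv_find_first {l0 r : List Char} (h : '\n' ∉ l0) :
    PySem.Chars.find (l0 ++ '\n' :: r) ['\n'] = (l0.length : Int) := by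
  set s := l0 ++ '\n' :: r with hs
  have hinf : ['\n'] <:+: s := by
    rw [List.singleton_infix_iff]; simp [hs]
  have hnn : 0 ≤ PySem.Chars.find s ['\n'] := (PySem.Chars.find_nonneg_iff s ['\n']).mpr hinf
  obtain ⟨hpre, hmin⟩ := PySem.Chars.find_spec hnn
  have hle : (PySem.Chars.find s ['\n']).toNat ≤ l0.length := by
    by_contra hgt
    push_neg at hgt
    exact hmin l0.length hgt (by simp [hs])
  have hge : l0.length ≤ (PySem.Chars.find s ['\n']).toNat := by
    by_contra hlt
    push_neg at hlt
    set i := (PySem.Chars.find s ['\n']).toNat with hi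
    have hdrop : s.drop i = l0.drop i ++ '\n' :: r := by
      rw [hs, List.drop_append_of_le_length (by omega)]
    obtain ⟨u, hu⟩ := hpre
    rw [hdrop] at hu
    have hne : l0.drop i ≠ [] := by
      intro hnil
      have : l0.length ≤ i := by
        have := List.drop_eq_nil_iff.mp hnil; omega
      omega
    rcases hd : l0.drop i with _ | ⟨d, ds⟩
    · exact hne hd
    · rw [hd] at hu
      have hdn : d = '\n' := by
        have := congrArg (fun l => l.head?) hu
        simpa using this.symm
      have : d ∈ l0 := by
        have : d ∈ l0.drop i := by rw [hd]; exact List.mem_cons_self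
        exact List.mem_of_mem_drop this
      exact h (hdn ▸ this)
  have : (PySem.Chars.find s ['\n']).toNat = l0.length := le_antisymm hle hge
  omega


-- the two else-branches agree, for any tail 'rest0' of the text
theorem pv_core (rest0 : List Char) (description : String) :
    (let rest := pvDropNLs rest0
     if description ≠ "" then
       let descNorm := PySem.Chars.strip description.toList
       let e0 := PySem.Chars.find rest ['\n']
       let e : Int := if e0 = -1 then (rest.length : Int) else e0
       let firstLine := PySem.Chars.strip (PySem.List.slice rest none (some e))
       if firstLine = descNorm then
         String.ofList (pvDropNLs (PySem.List.slice rest (some e) none))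
       else String.ofList rest
     else String.ofList rest)
    =
    (let lines := pvDropEmptyLines (PySem.Chars.splitOn rest0 ['\n'])
     let lines :=
       if description ≠ "" ∧ lines ≠ [] ∧
           PySem.Chars.strip lines.head! = PySem.Chars.strip description.toList then
         pvDropEmptyLines lines.tail
       else lines
     String.ofList (PySem.Chars.join ['\n'] lines)) := by
  simp only [pv_splitOn_eq]
  have hparts := pv_noNL rest0
  have hjoinparts : PySem.Chars.join ['\n'] (List.splitOn '\n' rest0) = rest0 :=
    List.intercalate_splitOn rest0 '\n'
  have h1 : PySem.Chars.join ['\n'] (pvDropEmptyLines (List.splitOn '\n' rest0))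
      = pvDropNLs rest0 := by
    rw [pv_join_dropEmpty _ hparts, hjoinparts]
  rcases pv_dropEmpty_shape (List.splitOn '\n' rest0) with hsh | ⟨l0, lt, hsh, hl0⟩
  · -- everything after the heading was newlines: both sides give ""
    rw [hsh] at h1
    have hrest : pvDropNLs rest0 = [] := by
      simpa [PySem.Chars.join, List.intercalate] using h1.symm
    rw [hsh]
    simp only [hrest]
    have hfind : PySem.Chars.find ([] : List Char) ['\n'] = -1 := pv_find_no_nl (by simp)
    simp only [hfind]
    split_ifs <;>
      simp [PySem.List.slice_from, pvDropNLs, pvDropEmptyLines,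
        PySem.Chars.join, List.intercalate]
  · rw [hsh] at h1 ⊢
    have hNL0 : '\n' ∉ l0 :=
      hparts l0 (pv_mem_dropEmptyLines (hsh ▸ List.mem_cons_self))
    have hNLt : ∀ l ∈ lt, '\n' ∉ l := fun l hl =>
      hparts l (pv_mem_dropEmptyLines (hsh ▸ List.mem_cons_of_mem _ hl))
    by_cases hd : description ≠ ""
    · rcases lt with _ | ⟨m, ms⟩
      · -- a single remaining line, no '\n' in it
        have hj : PySem.Chars.join ['\n'] [l0] = l0 := by
          simp [PySem.Chars.join, List.intercalate]
        rw [hj] at h1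
        simp only [← h1]
        have hfind := pv_find_no_nl hNL0
        rw [hfind]
        rw [show (if (-1 : Int) = -1 then ((l0.length : Int)) else (-1 : Int)) = (l0.length : Int)
            from if_pos rfl]
        have htake : PySem.List.slice l0 none (some (l0.length : Int)) = l0 := by
          rw [PySem.List.slice_to l0 (by positivity)]
          simp
        have hdrop : PySem.List.slice l0 (some (l0.length : Int)) none = [] := by
          rw [PySem.List.slice_from l0 (by positivity)]
          simp
        rw [htake, hdrop]
        by_cases hm : PySem.Chars.strip l0 = PySem.Chars.strip description.toList
        · simp [hm, hd, pvDropNLs, pvDropEmptyLines, PySem.Chars.join, List.intercalate]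
        · simp [hm, hd, hj]
      · -- more lines follow: rest = l0 ++ '\n' :: join(rest of the lines)
        have hj : PySem.Chars.join ['\n'] (l0 :: m :: ms)
            = l0 ++ '\n' :: PySem.Chars.join ['\n'] (m :: ms) := by
          simp [PySem.Chars.join, List.intercalate, List.intersperse]
        rw [hj] at h1
        simp only [← h1]
        have hfind := pv_find_first (r := PySem.Chars.join ['\n'] (m :: ms)) hNL0
        rw [hfind]
        have hne : ((l0.length : Int)) ≠ -1 := by omega
        rw [if_neg hne]
        have htake : PySem.List.slice (l0 ++ '\n' :: PySem.Chars.join ['\n'] (m :: ms)) none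
            (some (l0.length : Int)) = l0 := by
          rw [PySem.List.slice_to _ (by positivity)]
          simp
        have hdrop : PySem.List.slice (l0 ++ '\n' :: PySem.Chars.join ['\n'] (m :: ms))
            (some (l0.length : Int)) none = '\n' :: PySem.Chars.join ['\n'] (m :: ms) := by
          rw [PySem.List.slice_from _ (by positivity)]
          simp
        rw [htake, hdrop]
        by_cases hm : PySem.Chars.strip l0 = PySem.Chars.strip description.toList
        · have : pvDropNLs ('\n' :: PySem.Chars.join ['\n'] (m :: ms))
              = PySem.Chars.join ['\n'] (pvDropEmptyLines (m :: ms)) := by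
            rw [show pvDropNLs ('\n' :: PySem.Chars.join ['\n'] (m :: ms))
                  = pvDropNLs (PySem.Chars.join ['\n'] (m :: ms)) by simp [pvDropNLs]]
            exact (pv_join_dropEmpty _ hNLt).symm
          simp [hm, hd, this]
        · simp [hm, hd, hj, h1]
    · simp [hd, ← h1]

-- ===== VERDICT (by name: the statement is the Claim_ definition above) =====
theorem strip_generated_codex_prefix_py_spec : Claim_equal_strip_generated_codex_prefix_py := by
  unfold Claim_equal_strip_generated_codex_prefix_py
  intro text name description _
  unfold Spec_strip_generated_codex_prefix_py
  unfold strip_generated_codex_prefix_py strip_generated_codex_prefix_py_alt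
  by_cases hs : PySem.Chars.startswith text.toList ("## ".toList ++ name.toList ++ ['\n'])
  · simp only [hs, not_true_eq_false, if_neg (by simp : ¬ (False : Prop))]
    exact pv_core _ description
  · simp only [hs]
    rw [if_pos (by simpa using hs), if_pos (by simpa using hs)]
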